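-- pv_equiv track=rewrite | github.com/theCtrlxZ/rangersotb | rbtl_campaign.py | ring_cells
-- ===== SOURCE A (Python) =====
-- from typing import Any, Dict, List, Optional, Set, Tuple
--
-- def ring_cells(side: int, center: Tuple[int, int], dmin: int, dmax: int, used: Set[Tuple[int, int]]) -> List[Tuple[int, int]]:
--     cx, cy = center
--     out: List[Tuple[int, int]] = []
--     for x in range(side):
--         for y in range(side):
--             if (x, y) in used:
--                 continue
--             d = abs(x - cx) + abs(y - cy)
--             if dmin <= d <= dmax:
--                 out.append((x, y))
--     return out
-- ===== SOURCE B (Python) =====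
-- from typing import List, Set, Tuple
--
-- def ring_cells(side: int, center: Tuple[int, int], dmin: int, dmax: int, used: Set[Tuple[int, int]]) -> List[Tuple[int, int]]:
--     cx, cy = center
--     uset = set(used)
--     out: List[Tuple[int, int]] = []
--     for x in range(side):
--         a = abs(x - cx)
--         hi = dmax - a
--         if hi < 0:
--             continue
--         lo = dmin - a
--         if lo <= 0:
--             segs = [(cy - hi, cy + hi)]
--         else:
--             segs = [(cy - hi, cy - lo), (cy + lo, cy + hi)]
--         for s, e in segs:
--             for y in range(max(s, 0), min(e, side - 1) + 1):
--                 if (x, y) not in uset: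
--                     out.append((x, y))
--     return out
-- ===== Notes on version B (the rewrite author's own statement) =====
-- stated objective: faster
-- what changed: Instead of scanning all side*side cells and testing each cell's Manhattan distance, B computes for each x the valid y-interval(s) directly from the distance bounds (and hashes used once) and emits only those cells; intended as faster - a timing run measured ~53x at the largest size both finished, unconfirmed beyond that where the output itself is quadratic in side.
import Mathlib
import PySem

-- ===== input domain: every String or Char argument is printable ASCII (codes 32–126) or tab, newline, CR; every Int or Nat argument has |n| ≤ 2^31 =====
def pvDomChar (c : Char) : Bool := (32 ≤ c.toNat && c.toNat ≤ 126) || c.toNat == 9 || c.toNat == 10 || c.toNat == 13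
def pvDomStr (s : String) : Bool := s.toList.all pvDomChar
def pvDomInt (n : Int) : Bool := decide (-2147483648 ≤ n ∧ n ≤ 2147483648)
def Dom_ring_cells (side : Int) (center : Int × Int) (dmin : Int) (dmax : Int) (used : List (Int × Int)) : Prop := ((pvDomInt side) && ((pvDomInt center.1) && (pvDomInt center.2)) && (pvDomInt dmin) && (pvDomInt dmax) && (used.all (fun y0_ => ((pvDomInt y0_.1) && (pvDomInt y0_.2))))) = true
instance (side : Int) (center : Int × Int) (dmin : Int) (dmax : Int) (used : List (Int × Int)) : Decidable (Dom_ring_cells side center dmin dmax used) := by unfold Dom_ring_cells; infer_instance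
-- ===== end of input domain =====

-- B computes, for each x, the valid y-interval(s) directly from the Manhattan-distance
-- bounds instead of scanning all y in range(side); intended as faster (a timing run
-- measured ~50x at the largest size both versions finished; unconfirmed beyond that,
-- where the output itself is quadratic in side and both time out).


-- ===== PORT A =====
def ring_cells (side : Int) (center : Int × Int) (dmin : Int) (dmax : Int) (used : List (Int × Int)) : List (Int × Int) :=
  let cx := center.1
  let cy := center.2
  (PySem.List.pyRange 0 side 1).foldl (fun out x =>
    (PySem.List.pyRange 0 side 1).foldl (fun out y =>
      if (x, y) ∈ used then out
      else
        let d := |x - cx| + |y - cy|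
        if dmin ≤ d ∧ d ≤ dmax then out ++ [(x, y)] else out) out) []

-- ===== PORT B =====
def ring_cells_alt (side : Int) (center : Int × Int) (dmin : Int) (dmax : Int) (used : List (Int × Int)) : List (Int × Int) :=
  let cx := center.1
  let cy := center.2
  let uset : PySem.Set (Int × Int) := PySem.Set.ofList used
  (PySem.List.pyRange 0 side 1).foldl (fun out x =>
    let a := |x - cx|
    let hi := dmax - a
    if hi < 0 then out
    else
      let lo := dmin - a
      let segs : List (Int × Int) :=
        if lo ≤ 0 then [(cy - hi, cy + hi)] else [(cy - hi, cy - lo), (cy + lo, cy + hi)]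
      segs.foldl (fun out se =>
        (PySem.List.pyRange (max se.1 0) (min se.2 (side - 1) + 1) 1).foldl (fun out y =>
          if (x, y) ∈ uset then out else out ++ [(x, y)]) out) out) []

-- ===== PRECONDITION & SPEC =====
def Spec_ring_cells (side : Int) (center : Int × Int) (dmin : Int) (dmax : Int) (used : List (Int × Int)) (out : List (Int × Int)) : Prop := out = ring_cells_alt side center dmin dmax used
instance (side : Int) (center : Int × Int) (dmin : Int) (dmax : Int) (used : List (Int × Int)) (out : List (Int × Int)) : Decidable (Spec_ring_cells side center dmin dmax used out) := by unfold Spec_ring_cells; infer_instance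

-- ===== CLAIM (what is proved, stated in full; the proofs are below) =====
def Claim_equal_ring_cells : Prop := ∀ (side : Int) (center : Int × Int) (dmin : Int) (dmax : Int) (used : List (Int × Int)), Dom_ring_cells side center dmin dmax used → Spec_ring_cells side center dmin dmax used (ring_cells side center dmin dmax used)

-- ===== LEMMAS AND PROOFS =====

-- A's inner loop shape: skip if P, append f y if Q.
theorem pvFoldlGuard2 {α : Type} (l : List Int) (P Q : Int → Prop) [DecidablePred P]
    [DecidablePred Q] (f : Int → α) (acc : List α) :
    l.foldl (fun out y => if P y then out else if Q y then out ++ [f y] else out) acc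
      = acc ++ ((l.filter (fun y => !decide (P y) && decide (Q y))).map f) := by
  induction l generalizing acc with
  | nil => simp
  | cons h t ih =>
    by_cases hP : P h
    · simp [hP, ih]
    · by_cases hQ : Q h
      · simp [hP, hQ, ih]
      · simp [hP, hQ, ih]

-- B's innermost loop shape: append f y unless P.
theorem pvFoldlGuard1 {α : Type} (l : List Int) (P : Int → Prop) [DecidablePred P]
    (f : Int → α) (acc : List α) :
    l.foldl (fun out y => if P y then out else out ++ [f y]) acc
      = acc ++ ((l.filter (fun y => !decide (P y))).map f) := by
  induction l generalizing acc with
  | nil => simp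
  | cons h t ih =>
    by_cases hP : P h
    · simp [hP, ih]
    · simp [hP, ih]

-- set(used) has the same members as used.
theorem pvFilterUsedSet (used : List (Int × Int)) (x : Int) (l : List Int) :
    l.filter (fun y => !decide ((x, y) ∈ PySem.Set.ofList used))
      = l.filter (fun y => !decide ((x, y) ∈ used)) := by
  apply List.filter_congr
  intro y _
  simp [PySem.Set.mem_ofList]

-- Filtering range(n) by membership in two ordered disjoint closed intervals
-- yields the two clipped ranges, concatenated.
theorem pvFilterInterval2 (n lo1 hi1 lo2 hi2 : Int) (h12 : hi1 < lo2) :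
    (PySem.List.pyRange 0 n 1).filter
        (fun y => decide ((lo1 ≤ y ∧ y ≤ hi1) ∨ (lo2 ≤ y ∧ y ≤ hi2)))
      = PySem.List.pyRange (max lo1 0) (min hi1 (n - 1) + 1) 1
        ++ PySem.List.pyRange (max lo2 0) (min hi2 (n - 1) + 1) 1 := by
  have hmemL : ∀ y : Int, y ∈ (PySem.List.pyRange 0 n 1).filter
      (fun y => decide ((lo1 ≤ y ∧ y ≤ hi1) ∨ (lo2 ≤ y ∧ y ≤ hi2))) ↔
      (0 ≤ y ∧ y < n) ∧ ((lo1 ≤ y ∧ y ≤ hi1) ∨ (lo2 ≤ y ∧ y ≤ hi2)) := by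
    intro y
    simp [List.mem_filter, PySem.List.mem_pyRange_one]
  have hmemR : ∀ y : Int, y ∈ PySem.List.pyRange (max lo1 0) (min hi1 (n - 1) + 1) 1
      ++ PySem.List.pyRange (max lo2 0) (min hi2 (n - 1) + 1) 1 ↔
      (max lo1 0 ≤ y ∧ y < min hi1 (n - 1) + 1) ∨
      (max lo2 0 ≤ y ∧ y < min hi2 (n - 1) + 1) := by
    intro y
    simp [List.mem_append, PySem.List.mem_pyRange_one]
  have hpairL : ((PySem.List.pyRange 0 n 1).filter
      (fun y => decide ((lo1 ≤ y ∧ y ≤ hi1) ∨ (lo2 ≤ y ∧ y ≤ hi2)))).Pairwise (· < ·) :=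
    (PySem.List.pairwise_lt_pyRange_one 0 n).filter _
  have hpairR : (PySem.List.pyRange (max lo1 0) (min hi1 (n - 1) + 1) 1
      ++ PySem.List.pyRange (max lo2 0) (min hi2 (n - 1) + 1) 1).Pairwise (· < ·) := by
    rw [List.pairwise_append]
    refine ⟨PySem.List.pairwise_lt_pyRange_one _ _, PySem.List.pairwise_lt_pyRange_one _ _, ?_⟩
    intro a ha b hb
    rw [PySem.List.mem_pyRange_one] at ha hb
    omega
  have hnodL := hpairL.imp (fun {a b} h => ne_of_lt h)
  have hnodR := hpairR.imp (fun {a b} h => ne_of_lt h)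
  have hperm : ((PySem.List.pyRange 0 n 1).filter
      (fun y => decide ((lo1 ≤ y ∧ y ≤ hi1) ∨ (lo2 ≤ y ∧ y ≤ hi2)))).Perm
      (PySem.List.pyRange (max lo1 0) (min hi1 (n - 1) + 1) 1
        ++ PySem.List.pyRange (max lo2 0) (min hi2 (n - 1) + 1) 1) := by
    apply List.perm_of_nodup_nodup_toFinset_eq hnodL hnodR
    ext y
    simp only [List.mem_toFinset]
    rw [hmemL, hmemR]
    omega
  exact hperm.eq_of_pairwise (fun a _ b _ h1 h2 => absurd h2 (not_lt.mpr h1.le)) hpairL hpairR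

-- Single-interval version, derived from the two-interval one.
theorem pvFilterInterval1 (n lo1 hi1 : Int) :
    (PySem.List.pyRange 0 n 1).filter (fun y => decide (lo1 ≤ y ∧ y ≤ hi1))
      = PySem.List.pyRange (max lo1 0) (min hi1 (n - 1) + 1) 1 := by
  have h2 := pvFilterInterval2 n lo1 hi1 (hi1 + 1) hi1 (by omega)
  have hempty : PySem.List.pyRange (max (hi1 + 1) 0) (min hi1 (n - 1) + 1) 1 = [] :=
    PySem.List.pyRange_one_eq_nil (by omega)
  rw [hempty, List.append_nil] at h2
  rw [← h2]
  apply List.filter_congr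
  intro y _
  simp only [decide_eq_decide]
  omega

-- ===== VERDICT (by name: the statement is the Claim_ definition above) =====
theorem ring_cells_spec : Claim_equal_ring_cells := by
  intro side center dmin dmax used _
  unfold Spec_ring_cells ring_cells ring_cells_alt
  simp only []
  apply PySem.List.foldl_congr_mem
  intro acc x _
  rw [pvFoldlGuard2 (PySem.List.pyRange 0 side 1) (fun y => (x, y) ∈ used)
      (fun y => dmin ≤ |x - center.1| + |y - center.2| ∧ |x - center.1| + |y - center.2| ≤ dmax)
      (fun y => (x, y)) acc]
  have ha : (0:Int) ≤ |x - center.1| := abs_nonneg _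
  by_cases hhi : dmax - |x - center.1| < 0
  · rw [if_pos hhi]
    have hnil : (PySem.List.pyRange 0 side 1).filter
        (fun y => !decide ((x, y) ∈ used) &&
          decide (dmin ≤ |x - center.1| + |y - center.2| ∧ |x - center.1| + |y - center.2| ≤ dmax)) = [] := by
      apply List.filter_eq_nil_iff.mpr
      intro y _
      have hw : (0:Int) ≤ |y - center.2| := abs_nonneg _
      simp only [Bool.and_eq_true, decide_eq_true_iff, Bool.not_eq_eq_eq_not, Bool.not_true, not_and]
      intro _
      omega
    rw [hnil]
    simp
  · rw [if_neg hhi]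
    by_cases hlo : dmin - |x - center.1| ≤ 0
    · rw [if_pos hlo]
      simp only [List.foldl_cons, List.foldl_nil]
      rw [pvFoldlGuard1 _ (fun y => (x, y) ∈ PySem.Set.ofList used) (fun y => (x, y)) acc,
          pvFilterUsedSet]
      congr 1
      have hfc : (PySem.List.pyRange 0 side 1).filter
          (fun y => !decide ((x, y) ∈ used) &&
            decide (dmin ≤ |x - center.1| + |y - center.2| ∧ |x - center.1| + |y - center.2| ≤ dmax))
          = (PySem.List.pyRange 0 side 1).filter
          (fun y => !decide ((x, y) ∈ used) &&
            decide (center.2 - (dmax - |x - center.1|) ≤ y ∧ y ≤ center.2 + (dmax - |x - center.1|))) := by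
        apply List.filter_congr
        intro y _
        rcases abs_cases (y - center.2) with ⟨he, h0⟩ | ⟨he, h0⟩ <;>
          rw [he] <;> congr 1 <;> simp only [decide_eq_decide] <;> omega
      rw [hfc, ← List.filter_filter, pvFilterInterval1]
    · rw [if_neg hlo]
      simp only [List.foldl_cons, List.foldl_nil]
      rw [pvFoldlGuard1 _ (fun y => (x, y) ∈ PySem.Set.ofList used) (fun y => (x, y)),
          pvFoldlGuard1 _ (fun y => (x, y) ∈ PySem.Set.ofList used) (fun y => (x, y)),
          List.append_assoc]
      simp only [pvFilterUsedSet]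
      congr 1
      rw [← List.map_append, ← List.filter_append]
      congr 1
      have hfc : (PySem.List.pyRange 0 side 1).filter
          (fun y => !decide ((x, y) ∈ used) &&
            decide (dmin ≤ |x - center.1| + |y - center.2| ∧ |x - center.1| + |y - center.2| ≤ dmax))
          = (PySem.List.pyRange 0 side 1).filter
          (fun y => !decide ((x, y) ∈ used) &&
            decide ((center.2 - (dmax - |x - center.1|) ≤ y ∧ y ≤ center.2 - (dmin - |x - center.1|)) ∨
              (center.2 + (dmin - |x - center.1|) ≤ y ∧ y ≤ center.2 + (dmax - |x - center.1|)))) := by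
        apply List.filter_congr
        intro y _
        rcases abs_cases (y - center.2) with ⟨he, h0⟩ | ⟨he, h0⟩ <;>
          rw [he] <;> congr 1 <;> simp only [decide_eq_decide] <;> omega
      rw [hfc, ← List.filter_filter, pvFilterInterval2 _ _ _ _ _ (by omega)]
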